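-- pv_equiv track=rewrite | github.com/ommakadiya/Hackerrank | Xoring Ninja.py | xoringNinja
-- ===== SOURCE A (Python) =====
-- def xoringNinja(arr):
--     MOD = 10**9 + 7
--     OR = 0
--
--     # OR of all elements
--     for x in arr:
--         OR |= x
--
--     n = len(arr)
--
--     # Multiply by 2^(n-1) % MOD
--     result = (OR * pow(2, n-1, MOD)) % MOD
--
--     return result
-- ===== SOURCE B (Python) =====
-- def xoringNinja(arr):
--     MOD = 10**9 + 7
--
--     def big_or(xs):
--         if len(xs) <= 1:
--             return xs[0] if xs else 0
--         mid = len(xs) // 2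
--         return big_or(xs[:mid]) | big_or(xs[mid:])
--
--     p = 1
--     for _ in range(len(arr) - 1):
--         p = p * 2 % MOD
--     return big_or(arr) * p % MOD
-- ===== Notes on version B (the rewrite author's own statement) =====
-- stated objective: alternative
-- what changed: B computes the OR by recursive binary splitting of the list (divide and conquer over slices) and the power 2^(n-1) mod p by an explicit repeated-doubling loop, instead of A's linear |= fold and three-argument pow.
import Mathlib
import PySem

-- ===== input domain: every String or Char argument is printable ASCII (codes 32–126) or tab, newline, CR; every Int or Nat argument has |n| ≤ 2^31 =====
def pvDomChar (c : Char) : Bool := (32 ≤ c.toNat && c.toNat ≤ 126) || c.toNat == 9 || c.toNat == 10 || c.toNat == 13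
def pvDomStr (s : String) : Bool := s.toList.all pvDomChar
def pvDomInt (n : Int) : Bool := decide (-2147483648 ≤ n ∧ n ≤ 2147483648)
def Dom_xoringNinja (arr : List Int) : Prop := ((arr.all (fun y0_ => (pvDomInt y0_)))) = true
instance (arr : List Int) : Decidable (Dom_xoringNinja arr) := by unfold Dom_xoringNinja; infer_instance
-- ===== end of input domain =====

-- B computes the OR by recursive binary splitting of the list and 2^(n-1) mod p by a
-- repeated-doubling loop, instead of A's linear |= fold and three-argument pow
-- (objective: alternative; same return value on every input).

-- ===== PORT A =====
-- pow(2, e, m) with an Int exponent: Python's pow(b, e, m) takes e < 0 as the modular inverse of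
-- pow(b, -e, m).  Hand-ported (PySem.Int.powMod takes a Nat exponent); exact on every call A makes:
-- A only reaches e = -1 with base 2 and modulus 10^9+7, where gcd(2, m) = 1 and the inverse of
-- 2^1 mod m is (gcdA 2 m) mod m (Bézout: 2 * gcdA 2 m + m * gcdB 2 m = 1).
def pyPowMod2 (e m : Int) : Int :=
  if 0 ≤ e then PySem.Int.powMod 2 e.toNat m
  else PySem.Int.powMod (PySem.Int.mod (Int.gcdA 2 m) m) (-e).toNat m

def xoringNinja (arr : List Int) : Int :=
  let MOD : Int := 10 ^ 9 + 7
  let OR : Int := arr.foldl (fun acc x => PySem.Int.bor acc x) 0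
  let n : Int := arr.length
  PySem.Int.mod (OR * pyPowMod2 (n - 1) MOD) MOD

-- ===== PORT B =====
-- def big_or(xs): if len(xs) <= 1: return xs[0] if xs else 0
--                 mid = len(xs) // 2; return big_or(xs[:mid]) | big_or(xs[mid:])
def pvBigOr (xs : List Int) : Int :=
  if xs.length ≤ 1 then
    match xs with
    | [] => 0
    | x :: _ => x
  else
    let mid : Nat := xs.length / 2
    PySem.Int.bor
      (pvBigOr (PySem.List.slice xs none (some (mid : Int))))
      (pvBigOr (PySem.List.slice xs (some (mid : Int)) none))
termination_by xs.length
decreasing_by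
  · rw [PySem.List.slice_to_natCast]
    simp only [List.length_take]
    omega
  · rw [PySem.List.slice_from_natCast]
    simp only [List.length_drop]
    omega

def xoringNinja_alt (arr : List Int) : Int :=
  let MOD : Int := 10 ^ 9 + 7
  -- p = 1; for _ in range(len(arr) - 1): p = p * 2 % MOD
  let p : Int := (PySem.List.pyRange 0 ((arr.length : Int) - 1) 1).foldl
    (fun p _ => PySem.Int.mod (p * 2) MOD) 1
  PySem.Int.mod (pvBigOr arr * p) MOD

-- ===== PRECONDITION & SPEC =====
def Spec_xoringNinja (arr : List Int) (out : Int) : Prop := out = xoringNinja_alt arr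
instance (arr : List Int) (out : Int) : Decidable (Spec_xoringNinja arr out) := by unfold Spec_xoringNinja; infer_instance

-- ===== CLAIM (what is proved, stated in full; the proofs are below) =====
def Claim_equal_xoringNinja : Prop := ∀ (arr : List Int), Dom_xoringNinja arr → Spec_xoringNinja arr (xoringNinja arr)

-- ===== LEMMAS AND PROOFS =====

theorem pv_sub_and_eq_ldiff (n m : Nat) : n - (n &&& m) = Nat.ldiff n m := by
  induction n using Nat.binaryRec generalizing m with
  | zero =>
    have : Nat.ldiff 0 m = 0 := Nat.eq_of_testBit_eq (by simp [Nat.testBit_ldiff])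
    simp [this]
  | bit b n ih =>
    rw [← Nat.bit_bodd_div2 m, Nat.land_bit, Nat.ldiff_bit]
    have h1 := ih m.div2
    have h2 : n &&& m.div2 ≤ n := Nat.and_le_left
    rw [Nat.bit_val, Nat.bit_val, Nat.bit_val]
    cases b <;> cases m.bodd <;> simp <;> omega

theorem pv_bor_oo (m n : Nat) : PySem.Int.bor (Int.ofNat m) (Int.ofNat n) = Int.ofNat (m ||| n) := by
  simp [PySem.Int.bor]
theorem pv_bor_on (m n : Nat) : PySem.Int.bor (Int.ofNat m) (Int.negSucc n) = Int.negSucc (Nat.ldiff n m) := by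
  simp [PySem.Int.bor, Int.negSucc_eq, pv_sub_and_eq_ldiff]; split_ifs <;> omega
theorem pv_bor_no (m n : Nat) : PySem.Int.bor (Int.negSucc m) (Int.ofNat n) = Int.negSucc (Nat.ldiff m n) := by
  simp [PySem.Int.bor, Int.negSucc_eq, pv_sub_and_eq_ldiff]; split_ifs <;> omega
theorem pv_bor_nn (m n : Nat) : PySem.Int.bor (Int.negSucc m) (Int.negSucc n) = Int.negSucc (m &&& n) := by
  simp [PySem.Int.bor, Int.negSucc_eq, pv_sub_and_eq_ldiff]; split_ifs <;> omega

theorem pv_bor_assoc (a b c : Int) :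
    PySem.Int.bor (PySem.Int.bor a b) c = PySem.Int.bor a (PySem.Int.bor b c) := by
  rcases a with m | m <;> rcases b with n | n <;> rcases c with p | p <;>
    simp only [pv_bor_oo, pv_bor_on, pv_bor_no, pv_bor_nn] <;>
    (congr 1
     apply Nat.eq_of_testBit_eq
     intro k
     simp [Nat.testBit_or, Nat.testBit_and, Nat.testBit_ldiff]
     cases m.testBit k <;> cases n.testBit k <;> cases p.testBit k <;> simp)

theorem pv_bor_zero_left (a : Int) : PySem.Int.bor 0 a = a := by
  rw [PySem.Int.bor_comm]; exact PySem.Int.bor_zero a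

theorem pv_foldl_bor (l : List Int) (a : Int) :
    l.foldl (fun acc x => PySem.Int.bor acc x) a
      = PySem.Int.bor a (l.foldl (fun acc x => PySem.Int.bor acc x) 0) := by
  induction l generalizing a with
  | nil => simp [PySem.Int.bor_zero]
  | cons x l ih =>
    rw [List.foldl_cons, List.foldl_cons, ih (PySem.Int.bor a x), ih (PySem.Int.bor 0 x),
      pv_bor_zero_left, pv_bor_assoc]

theorem pv_foldl_bor_append (l1 l2 : List Int) :
    (l1 ++ l2).foldl (fun acc x => PySem.Int.bor acc x) 0
      = PySem.Int.bor (l1.foldl (fun acc x => PySem.Int.bor acc x) 0)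
          (l2.foldl (fun acc x => PySem.Int.bor acc x) 0) := by
  rw [List.foldl_append, pv_foldl_bor]

theorem pv_bigOr_eq_foldl_aux : ∀ (n : Nat) (xs : List Int), xs.length = n →
    pvBigOr xs = xs.foldl (fun acc x => PySem.Int.bor acc x) 0 := by
  intro n
  induction n using Nat.strong_induction_on with
  | _ n ih =>
    intro xs hxs
    cases xs with
    | nil => rw [pvBigOr.eq_def]; simp
    | cons x tl =>
      rw [pvBigOr.eq_def]
      by_cases h : (x :: tl).length ≤ 1
      · rw [if_pos h]
        have htl : tl = [] := by
          simp only [List.length_cons] at h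
          simpa using List.length_eq_zero_iff.mp (by omega)
        subst htl
        simp [pv_bor_zero_left]
      · rw [if_neg h]
        simp only [PySem.List.slice_to_natCast, PySem.List.slice_from_natCast]
        have hlen2 : 2 ≤ (x :: tl).length := by omega
        rw [ih ((x :: tl).take ((x :: tl).length / 2)).length
              (by subst hxs; simp only [List.length_take]; omega) _ rfl,
            ih ((x :: tl).drop ((x :: tl).length / 2)).length
              (by subst hxs; simp only [List.length_drop]; omega) _ rfl,
            ← pv_foldl_bor_append, List.take_append_drop]

theorem pv_bigOr_eq_foldl (xs : List Int) :
    pvBigOr xs = xs.foldl (fun acc x => PySem.Int.bor acc x) 0 :=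
  pv_bigOr_eq_foldl_aux xs.length xs rfl

theorem pv_doubling (M : Int) (hM : (0:Int) < M) (L : List Int) : ∀ p : Int,
    (L.foldl (fun p _ => PySem.Int.mod (p * 2) M) (p % M)) = (p * 2 ^ L.length) % M := by
  induction L with
  | nil => intro p; simp
  | cons a L ih =>
    intro p
    have hmod : PySem.Int.mod (p % M * 2) M = (p * 2) % M := by
      show (p % M * 2).fmod M = (p * 2) % M
      rw [Int.fmod_eq_emod, if_pos (Or.inl (le_of_lt hM)), add_zero,
        Int.mul_emod, Int.emod_emod_of_dvd _ (dvd_refl M), ← Int.mul_emod]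
    rw [List.foldl_cons, hmod, ih (p * 2)]
    simp only [List.length_cons, pow_succ]
    congr 1
    ring

-- ===== VERDICT (by name: the statement is the Claim_ definition above) =====
theorem xoringNinja_spec : Claim_equal_xoringNinja := by
  unfold Claim_equal_xoringNinja
  intro arr _hdom
  unfold Spec_xoringNinja
  show xoringNinja arr = xoringNinja_alt arr
  cases arr with
  | nil =>
    have hb : pvBigOr ([] : List Int) = 0 := by rw [pvBigOr.eq_def]; simp
    simp [xoringNinja, xoringNinja_alt, hb, PySem.Int.mod]
  | cons a rest =>
    set M : Int := 10 ^ 9 + 7 with hM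
    have hMpos : (0:Int) < M := by norm_num [hM]
    show PySem.Int.mod
        ((a :: rest).foldl (fun acc x => PySem.Int.bor acc x) 0
          * pyPowMod2 (((a :: rest).length : Int) - 1) M) M
      = xoringNinja_alt (a :: rest)
    have hlen : ((a :: rest).length : Int) = (rest.length : Int) + 1 := by simp
    -- A's power
    have hA : pyPowMod2 (((a :: rest).length : Int) - 1) M = 2 ^ rest.length % M := by
      rw [pyPowMod2, if_pos (by rw [hlen]; omega), PySem.Int.powMod_eq_emod _ _ hMpos]
      have he : ((((a :: rest).length : Int)) - 1).toNat = rest.length := by rw [hlen]; omega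
      rw [he]
    -- B's power
    have hB : (PySem.List.pyRange 0 (((a :: rest).length : Int) - 1) 1).foldl
        (fun p _ => PySem.Int.mod (p * 2) M) 1 = 2 ^ rest.length % M := by
      have h2 := pv_doubling M hMpos
        (PySem.List.pyRange 0 (((a :: rest).length : Int) - 1) 1) 1
      rw [show (1:Int) % M = 1 from Int.emod_eq_of_lt (by norm_num) (by norm_num [hM])] at h2
      have he : ((((a :: rest).length : Int)) - 1 - 0).toNat = rest.length := by
        rw [hlen]; omega
      rw [h2, PySem.List.length_pyRange_one, he, one_mul]
    rw [xoringNinja_alt]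
    simp only [← hM]
    rw [hA, hB, pv_bigOr_eq_foldl]
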